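-- pv_equiv track=rewrite | github.com/kyuhyoung/RF-Solver-Edit | refine_geotiff.py | compute_tiles
-- ===== SOURCE A (Python) =====
-- def compute_tiles(h, w, tile_size, overlap):
--     """Compute tile positions with overlap."""
--     step = tile_size - overlap
--     tiles = []
--     for y in range(0, h, step):
--         for x in range(0, w, step):
--             y_end = min(y + tile_size, h)
--             x_end = min(x + tile_size, w)
--             y_start = max(0, y_end - tile_size)
--             x_start = max(0, x_end - tile_size)
--             tiles.append((y_start, x_start, y_end, x_end))
--     tiles = list(set(tiles))
--     tiles.sort()
--     return tiles
-- ===== SOURCE B (Python) =====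
-- def compute_tiles(h, w, tile_size, overlap):
--     """Compute tile positions with overlap."""
--     step = tile_size - overlap
--     y_ivals = set()
--     for y in range(0, h, step):
--         y_end = min(y + tile_size, h)
--         y_ivals.add((max(0, y_end - tile_size), y_end))
--     x_ivals = set()
--     for x in range(0, w, step):
--         x_end = min(x + tile_size, w)
--         x_ivals.add((max(0, x_end - tile_size), x_end))
--     return sorted((ys, xs, ye, xe) for (ys, ye) in y_ivals for (xs, xe) in x_ivals)
-- ===== Notes on version B (the rewrite author's own statement) =====
-- stated objective: alternative
-- what changed: A runs one nested 2D loop appending every tile tuple and dedups the whole list through set(); B computes the distinct y-intervals and x-intervals in two independent 1D passes (deduped per axis) and builds the result as their Cartesian product, then sorts as A does.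
import Mathlib
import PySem

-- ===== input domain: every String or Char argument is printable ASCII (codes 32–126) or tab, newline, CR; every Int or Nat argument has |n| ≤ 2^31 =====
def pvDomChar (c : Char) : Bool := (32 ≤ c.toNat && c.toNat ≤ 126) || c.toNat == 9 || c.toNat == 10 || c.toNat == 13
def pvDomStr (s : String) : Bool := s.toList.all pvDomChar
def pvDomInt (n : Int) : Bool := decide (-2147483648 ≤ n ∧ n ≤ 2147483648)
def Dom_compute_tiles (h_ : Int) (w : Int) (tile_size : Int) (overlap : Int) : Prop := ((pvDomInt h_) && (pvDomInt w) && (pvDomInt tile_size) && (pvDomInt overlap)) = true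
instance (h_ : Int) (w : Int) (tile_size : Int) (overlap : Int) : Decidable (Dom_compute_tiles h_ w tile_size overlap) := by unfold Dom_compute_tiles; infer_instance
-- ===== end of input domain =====

-- B replaces A's nested 2D loop + whole-tuple set-dedup by two independent 1D interval passes
-- (one per axis, deduped per axis) and a Cartesian product, then the same final sort (objective: alternative).

-- Python sorts tuples of ints lexicographically; PySem has no 4-tuple sort key, so the sort is
-- ported by hand through this key into Mathlib's lexicographic order ×ₗ on Int — exact for int 4-tuples.
def pvLexKey (t : Int × Int × Int × Int) : Int ×ₗ (Int ×ₗ (Int ×ₗ Int)) :=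
  toLex (t.1, toLex (t.2.1, toLex (t.2.2.1, t.2.2.2)))

-- ===== PORT A =====
-- list(set(tiles)) is ported as PySem.Set.ofList: its hash order is not modelled, but the set is
-- only consumed by the sort under the injective key pvLexKey, so the result is order-independent.
def compute_tiles (h_ : Int) (w : Int) (tile_size : Int) (overlap : Int) : List (Int × Int × Int × Int) :=
  let step := tile_size - overlap
  let tiles := (PySem.List.pyRange 0 h_ step).foldl (fun acc y =>
    (PySem.List.pyRange 0 w step).foldl (fun acc2 x =>
      let y_end := min (y + tile_size) h_
      let x_end := min (x + tile_size) w
      let y_start := max 0 (y_end - tile_size)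
      let x_start := max 0 (x_end - tile_size)
      acc2 ++ [(y_start, x_start, y_end, x_end)]) acc) []
  PySem.List.sorted (PySem.Set.ofList tiles) pvLexKey

-- ===== PORT B =====
def compute_tiles_alt (h_ : Int) (w : Int) (tile_size : Int) (overlap : Int) : List (Int × Int × Int × Int) :=
  let step := tile_size - overlap
  let y_ivals := (PySem.List.pyRange 0 h_ step).foldl (fun s y =>
    let y_end := min (y + tile_size) h_
    PySem.Set.add s (max 0 (y_end - tile_size), y_end)) []
  let x_ivals := (PySem.List.pyRange 0 w step).foldl (fun s x =>
    let x_end := min (x + tile_size) w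
    PySem.Set.add s (max 0 (x_end - tile_size), x_end)) []
  PySem.List.sorted (y_ivals.flatMap (fun yi => x_ivals.map (fun xi => (yi.1, xi.1, yi.2, xi.2)))) pvLexKey

-- ===== PRECONDITION & SPEC =====
-- Pre_ excludes exactly step = tile_size - overlap = 0, where Python's range(0, h, 0) raises ValueError.
def Pre_compute_tiles (h_ : Int) (w : Int) (tile_size : Int) (overlap : Int) : Prop := tile_size - overlap ≠ 0
instance (h_ : Int) (w : Int) (tile_size : Int) (overlap : Int) : Decidable (Pre_compute_tiles h_ w tile_size overlap) := by unfold Pre_compute_tiles; infer_instance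
def pvWitness_compute_tiles : Int × Int × Int × Int := (10, 12, 4, 1)

def Spec_compute_tiles (h_ : Int) (w : Int) (tile_size : Int) (overlap : Int) (out : List (Int × Int × Int × Int)) : Prop := out = compute_tiles_alt h_ w tile_size overlap
instance (h_ : Int) (w : Int) (tile_size : Int) (overlap : Int) (out : List (Int × Int × Int × Int)) : Decidable (Spec_compute_tiles h_ w tile_size overlap out) := by unfold Spec_compute_tiles; infer_instance

-- ===== CLAIM (what is proved, stated in full; the proofs are below) =====
def Claim_equal_compute_tiles : Prop := ∀ (h_ : Int) (w : Int) (tile_size : Int) (overlap : Int), Dom_compute_tiles h_ w tile_size overlap → Pre_compute_tiles h_ w tile_size overlap → Spec_compute_tiles h_ w tile_size overlap (compute_tiles h_ w tile_size overlap)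

-- ===== LEMMAS AND PROOFS =====

theorem pvLexKey_injective : Function.Injective pvLexKey := by
  intro a b h
  obtain ⟨a1, a2, a3, a4⟩ := a; obtain ⟨b1, b2, b3, b4⟩ := b
  simpa [pvLexKey, Prod.ext_iff] using h

-- combining a y-interval and an x-interval into a tile is injective
theorem pvComb_injective :
    Function.Injective (fun p : (Int × Int) × (Int × Int) => (p.1.1, p.2.1, p.1.2, p.2.2)) := by
  intro ⟨⟨a1, a2⟩, ⟨a3, a4⟩⟩ ⟨⟨b1, b2⟩, ⟨b3, b4⟩⟩ h
  simp only [Prod.ext_iff] at h ⊢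
  exact ⟨⟨h.1, h.2.2.1⟩, h.2.1, h.2.2.2⟩

-- the deduped 2D tile list is a permutation of the product of the per-axis deduped interval lists
theorem pv_perm (rY rX : List Int) (fy fx : Int → Int × Int) :
    (PySem.Set.ofList (rY.flatMap (fun y => rX.map (fun x => ((fy y).1, (fx x).1, (fy y).2, (fx x).2))))).Perm
      ((PySem.Set.ofList (rY.map fy)).flatMap (fun yi =>
        (PySem.Set.ofList (rX.map fx)).map (fun xi => (yi.1, xi.1, yi.2, xi.2)))) := by
  have hprod : ((PySem.Set.ofList (rY.map fy)).flatMap (fun yi =>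
        (PySem.Set.ofList (rX.map fx)).map (fun xi => (yi.1, xi.1, yi.2, xi.2))))
      = ((PySem.Set.ofList (rY.map fy)).product (PySem.Set.ofList (rX.map fx))).map
          (fun p => (p.1.1, p.2.1, p.1.2, p.2.2)) := by
    simp [List.product, List.map_flatMap, Function.comp_def]
  have nd2 : ((PySem.Set.ofList (rY.map fy)).flatMap (fun yi =>
        (PySem.Set.ofList (rX.map fx)).map (fun xi => (yi.1, xi.1, yi.2, xi.2)))).Nodup := by
    rw [hprod]
    exact ((PySem.Set.nodup_ofList _).product (PySem.Set.nodup_ofList _)).map pvComb_injective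
  refine (List.perm_ext_iff_of_nodup (PySem.Set.nodup_ofList _) nd2).2 ?_
  intro t
  simp only [PySem.Set.mem_ofList, List.mem_flatMap, List.mem_map]
  constructor
  · rintro ⟨y, hy, x, hx, rfl⟩
    exact ⟨fy y, ⟨y, hy, rfl⟩, fx x, ⟨x, hx, rfl⟩, rfl⟩
  · rintro ⟨yi, ⟨y, hy, rfl⟩, xi, ⟨x, hx, rfl⟩, rfl⟩
    exact ⟨y, hy, x, hx, rfl⟩

-- ===== VERDICT (by name: the statement is the Claim_ definition above) =====
theorem compute_tiles_spec : Claim_equal_compute_tiles := by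
  intro h_ w tile_size overlap _ _
  show compute_tiles h_ w tile_size overlap = compute_tiles_alt h_ w tile_size overlap
  unfold compute_tiles compute_tiles_alt
  simp only [PySem.List.foldl_append_singleton_eq_map, PySem.List.foldl_append_eq_flatMap,
    List.nil_append]
  rw [← PySem.Set.update_map_eq_foldl_add (PySem.List.pyRange 0 h_ (tile_size - overlap))
        (fun y => (max 0 (min (y + tile_size) h_ - tile_size), min (y + tile_size) h_)) ([] : PySem.Set (Int × Int)),
      ← PySem.Set.update_map_eq_foldl_add (PySem.List.pyRange 0 w (tile_size - overlap))
        (fun x => (max 0 (min (x + tile_size) w - tile_size), min (x + tile_size) w)) ([] : PySem.Set (Int × Int)),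
      PySem.Set.update_nil_left, PySem.Set.update_nil_left]
  exact PySem.List.sorted_eq_sorted_of_perm _ _ pvLexKey pvLexKey_injective
    (pv_perm (PySem.List.pyRange 0 h_ (tile_size - overlap)) (PySem.List.pyRange 0 w (tile_size - overlap))
      (fun y => (max 0 (min (y + tile_size) h_ - tile_size), min (y + tile_size) h_))
      (fun x => (max 0 (min (x + tile_size) w - tile_size), min (x + tile_size) w)))
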